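-- pv_equiv track=rewrite | github.com/TechCee/scrapy | server.py | _detect_column_mappings
-- ===== SOURCE A (Python) =====
-- COLUMN_MAPPINGS = {
--     "name": ["name", "full name", "fullname", "contact name", "person", "contact"],
--     "email": ["email", "email address", "e-mail", "work email", "primary email", "mail"],
--     "job_title": ["job title", "title", "position", "role", "job"],
--     "company": ["company", "company name", "organization", "employer", "firm"],
--     "company_domain": ["domain", "company domain", "website"],
--     "source_url": ["linkedin", "linkedin url", "source url", "source", "profile url", "url", "link"],
--     "validated": ["validated", "valid", "verified"],
--     "contacted": ["contacted"],
--     "responded": ["responded"],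
--     "unemployed": ["unemployed"],
--     "alternative_email": ["alternative email", "alt email", "secondary email", "alternate email", "other email", "alt. email"],
-- }
--
-- def _normalize_header(h):
--     """Normalize header for matching: lowercase, strip, remove underscores."""
--     if not h:
--         return ""
--     return str(h).strip().lower().replace("_", " ")
--
-- def _detect_column_mappings(header_row):
--     """
--     Detect which columns map to which DB fields.
--     Returns dict: {db_field: (col_index, original_header_name)}
--     Uses a two-pass approach: exact matches first, then partial matches.
--     """
--     if not header_row:
--         return {}
--
--     col_map = {}
--     used_cols = set()
--
--     # First pass: exact matches only
--     for col_idx, header in enumerate(header_row):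
--         normalized = _normalize_header(header)
--         if not normalized:
--             continue
--
--         for db_field, variations in COLUMN_MAPPINGS.items():
--             if db_field in col_map:
--                 continue
--             for variation in variations:
--                 if normalized == variation:
--                     col_map[db_field] = (col_idx, str(header).strip())
--                     used_cols.add(col_idx)
--                     break
--
--     # Second pass: partial matches for remaining columns
--     # Sort variations by length (longest first) to prefer more specific matches
--     for col_idx, header in enumerate(header_row):
--         if col_idx in used_cols:
--             continue
--         normalized = _normalize_header(header)
--         if not normalized:
--             continue
--
--         best_match = None
--         best_match_len = 0
--
--         for db_field, variations in COLUMN_MAPPINGS.items():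
--             if db_field in col_map:
--                 continue
--             for variation in variations:
--                 if variation in normalized and len(variation) > best_match_len:
--                     best_match = db_field
--                     best_match_len = len(variation)
--
--         if best_match:
--             col_map[best_match] = (col_idx, str(header).strip())
--             used_cols.add(col_idx)
--
--     return col_map
-- ===== SOURCE B (Python) =====
-- # B: inverted indexes built once from COLUMN_MAPPINGS — a dict for exact matches and a
-- # length-sorted (longest-first) pair list for partial matches — replacing A's nested field x variation scans.
--
-- COLUMN_MAPPINGS = {
--     "name": ["name", "full name", "fullname", "contact name", "person", "contact"],
--     "email": ["email", "email address", "e-mail", "work email", "primary email", "mail"],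
--     "job_title": ["job title", "title", "position", "role", "job"],
--     "company": ["company", "company name", "organization", "employer", "firm"],
--     "company_domain": ["domain", "company domain", "website"],
--     "source_url": ["linkedin", "linkedin url", "source url", "source", "profile url", "url", "link"],
--     "validated": ["validated", "valid", "verified"],
--     "contacted": ["contacted"],
--     "responded": ["responded"],
--     "unemployed": ["unemployed"],
--     "alternative_email": ["alternative email", "alt email", "secondary email", "alternate email", "other email", "alt. email"],
-- }
--
-- # variation -> db field (variations are unique across fields)
-- EXACT_INDEX = {v: f for f, vs in COLUMN_MAPPINGS.items() for v in vs}
--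
-- # (field, variation) pairs, longest variation first; the stable sort keeps the
-- # original (field, variation) order among equal lengths, so 'first match wins'
-- # reproduces A's 'strictly longer beats' tie-breaking.
-- PARTIAL_INDEX = sorted(
--     ((f, v) for f, vs in COLUMN_MAPPINGS.items() for v in vs),
--     key=lambda p: len(p[1]), reverse=True,
-- )
--
--
-- def _normalize_header(h):
--     if not h:
--         return ""
--     return str(h).strip().lower().replace("_", " ")
--
--
-- def _detect_column_mappings(header_row):
--     if not header_row:
--         return {}
--
--     col_map = {}
--     used_cols = set()
--
--     # First pass: one dict lookup per header.
--     for col_idx, header in enumerate(header_row):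
--         normalized = _normalize_header(header)
--         if not normalized:
--             continue
--         field = EXACT_INDEX.get(normalized)
--         if field is not None and field not in col_map:
--             col_map[field] = (col_idx, str(header).strip())
--             used_cols.add(col_idx)
--
--     # Second pass: first substring hit in the longest-first pair list.
--     for col_idx, header in enumerate(header_row):
--         if col_idx in used_cols:
--             continue
--         normalized = _normalize_header(header)
--         if not normalized:
--             continue
--         for field, variation in PARTIAL_INDEX:
--             if field not in col_map and variation in normalized:
--                 col_map[field] = (col_idx, str(header).strip())
--                 used_cols.add(col_idx)
--                 break
--
--     return col_map
-- ===== Notes on version B (the rewrite author's own statement) =====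
-- stated objective: faster
-- what changed: B precomputes two inverted indexes from COLUMN_MAPPINGS - a variation-to-field dict that replaces A's nested field x variation scan in the exact pass with one hash lookup per column, and a longest-first (field, variation) list whose first substring hit replaces A's strict-improvement argmax scan in the partial pass.
import Mathlib
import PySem

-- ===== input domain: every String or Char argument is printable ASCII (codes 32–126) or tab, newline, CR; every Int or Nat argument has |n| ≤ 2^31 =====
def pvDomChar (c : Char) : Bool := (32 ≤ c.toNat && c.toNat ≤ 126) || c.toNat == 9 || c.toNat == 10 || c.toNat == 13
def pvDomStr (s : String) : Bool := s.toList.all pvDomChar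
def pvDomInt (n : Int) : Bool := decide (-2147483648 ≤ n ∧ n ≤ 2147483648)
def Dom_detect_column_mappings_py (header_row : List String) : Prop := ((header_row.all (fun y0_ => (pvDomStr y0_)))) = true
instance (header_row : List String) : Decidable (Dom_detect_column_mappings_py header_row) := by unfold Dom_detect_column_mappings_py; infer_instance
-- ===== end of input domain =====

-- B replaces A's nested field×variation scans with inverted indexes built once from
-- COLUMN_MAPPINGS: a variation→field dict for the exact pass and a longest-first
-- (field, variation) list whose first hit decides the partial pass (measured faster in a timing run).

-- ===== PORT A =====
def pvColumnMappings : List (String × List String) :=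
  [("name", ["name", "full name", "fullname", "contact name", "person", "contact"]),
   ("email", ["email", "email address", "e-mail", "work email", "primary email", "mail"]),
   ("job_title", ["job title", "title", "position", "role", "job"]),
   ("company", ["company", "company name", "organization", "employer", "firm"]),
   ("company_domain", ["domain", "company domain", "website"]),
   ("source_url", ["linkedin", "linkedin url", "source url", "source", "profile url", "url", "link"]),
   ("validated", ["validated", "valid", "verified"]),
   ("contacted", ["contacted"]),
   ("responded", ["responded"]),
   ("unemployed", ["unemployed"]),
   ("alternative_email", ["alternative email", "alt email", "secondary email", "alternate email", "other email", "alt. email"])]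

def pvNormalizeHeader (h : String) : String :=
  if h == "" then "" else PySem.Str.replace (PySem.Str.lower (PySem.Str.strip h)) "_" " "

-- first pass body of A for one column: nested scan over fields and variations (break = any)
def pvColA1 (st : PySem.Dict String (Int × String) × PySem.Set Int) (p : Int × String) :
    PySem.Dict String (Int × String) × PySem.Set Int :=
  let s := pvNormalizeHeader p.2
  if s == "" then st
  else
    pvColumnMappings.foldl (fun st fv =>
      if st.1.contains fv.1 then st
      else if fv.2.any (fun v => s == v) then
        (st.1.insert fv.1 (p.1, PySem.Str.strip p.2), PySem.Set.add st.2 p.1)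
      else st) st

-- second pass best-match scan of A (best_match, best_match_len accumulator)
def pvBestA (s : String) (d : PySem.Dict String (Int × String)) : Option String × Int :=
  pvColumnMappings.foldl (fun acc fv =>
    if d.contains fv.1 then acc
    else fv.2.foldl (fun acc v =>
      if PySem.Str.isIn v s = true ∧ PySem.Str.len v > acc.2 then (some fv.1, PySem.Str.len v)
      else acc) acc) (none, 0)

def pvColA2 (st : PySem.Dict String (Int × String) × PySem.Set Int) (p : Int × String) :
    PySem.Dict String (Int × String) × PySem.Set Int :=
  if st.2.contains p.1 then st
  else if pvNormalizeHeader p.2 == "" then st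
  else
      match (pvBestA (pvNormalizeHeader p.2) st.1).1 with
      | some f => (st.1.insert f (p.1, PySem.Str.strip p.2), PySem.Set.add st.2 p.1)
      | none => st

def detect_column_mappings_py (header_row : List String) : List (String × Int × String) :=
  if header_row.isEmpty then []
  else
    let st1 := (PySem.List.enumerate header_row 0).foldl pvColA1 (PySem.Dict.empty, PySem.Set.empty)
    let st2 := (PySem.List.enumerate header_row 0).foldl pvColA2 st1
    st2.1.items

-- ===== PORT B =====
-- EXACT_INDEX = {v: f for f, vs in COLUMN_MAPPINGS.items() for v in vs}
def pvExactIndex : PySem.Dict String String :=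
  pvColumnMappings.foldl (fun d fv => fv.2.foldl (fun d v => d.insert v fv.1) d) PySem.Dict.empty

-- PARTIAL_INDEX = sorted(((f, v) ...), key=lambda p: len(p[1]), reverse=True)
def pvPartialIndex : List (String × String) :=
  PySem.List.sorted (pvColumnMappings.flatMap (fun fv => fv.2.map (fun v => (fv.1, v))))
    (fun p => PySem.Str.len p.2) true

def pvColB1 (st : PySem.Dict String (Int × String) × PySem.Set Int) (p : Int × String) :
    PySem.Dict String (Int × String) × PySem.Set Int :=
  let s := pvNormalizeHeader p.2
  if s == "" then st
  else
    match pvExactIndex.get? s with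
    | some f =>
        if st.1.contains f then st
        else (st.1.insert f (p.1, PySem.Str.strip p.2), PySem.Set.add st.2 p.1)
    | none => st

def pvColB2 (st : PySem.Dict String (Int × String) × PySem.Set Int) (p : Int × String) :
    PySem.Dict String (Int × String) × PySem.Set Int :=
  if st.2.contains p.1 then st
  else if pvNormalizeHeader p.2 == "" then st
  else
      match pvPartialIndex.find? (fun q => !st.1.contains q.1 && PySem.Str.isIn q.2 (pvNormalizeHeader p.2)) with
      | some q => (st.1.insert q.1 (p.1, PySem.Str.strip p.2), PySem.Set.add st.2 p.1)
      | none => st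

def detect_column_mappings_py_alt (header_row : List String) : List (String × Int × String) :=
  if header_row.isEmpty then []
  else
    let st1 := (PySem.List.enumerate header_row 0).foldl pvColB1 (PySem.Dict.empty, PySem.Set.empty)
    let st2 := (PySem.List.enumerate header_row 0).foldl pvColB2 st1
    st2.1.items

-- ===== PRECONDITION & SPEC =====
def Spec_detect_column_mappings_py (header_row : List String) (out : List (String × Int × String)) : Prop := out = detect_column_mappings_py_alt header_row
instance (header_row : List String) (out : List (String × Int × String)) : Decidable (Spec_detect_column_mappings_py header_row out) := by unfold Spec_detect_column_mappings_py; infer_instance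

-- ===== CLAIM (what is proved, stated in full; the proofs are below) =====
def Claim_equal_detect_column_mappings_py : Prop := ∀ (header_row : List String), Dom_detect_column_mappings_py header_row → Spec_detect_column_mappings_py header_row (detect_column_mappings_py header_row)

-- ===== LEMMAS AND PROOFS =====

-- ---- generic fold helpers ----
lemma pvFoldl_id {α β : Type} (f : β → α → β) (b : β) (l : List α)
    (h : ∀ b x, x ∈ l → f b x = b) : l.foldl f b = b := by
  induction l generalizing b with
  | nil => rfl
  | cons x t ih =>
      simp only [List.foldl_cons, h b x (by simp)]
      exact ih b (fun b y hy => h b y (by simp [hy]))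

lemma pvFoldl_ext {α β : Type} (f g : β → α → β) (b : β) (l : List α)
    (h : ∀ b x, x ∈ l → f b x = g b x) : l.foldl f b = l.foldl g b := by
  induction l generalizing b with
  | nil => rfl
  | cons x t ih =>
      simp only [List.foldl_cons, h b x (by simp)]
      exact ih _ (fun b y hy => h b y (by simp [hy]))

-- ---- pass 1: the nested exact scan equals one lookup in the inverted dict ----
lemma pvGet?_insertAll_not_mem (s f : String) (vs : List String) (d : PySem.Dict String String)
    (hs : s ∉ vs) : (vs.foldl (fun d v => d.insert v f) d).get? s = d.get? s := by
  induction vs generalizing d with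
  | nil => rfl
  | cons v t ih =>
      have hs' : s ≠ v ∧ s ∉ t := by simpa [not_or] using hs
      simp only [List.foldl_cons]
      rw [ih _ hs'.2]
      exact PySem.Dict.get?_insert_of_ne _ _ hs'.1

lemma pvGet?_insertAll_mem (s f : String) (vs : List String) (d : PySem.Dict String String)
    (hs : s ∈ vs) : (vs.foldl (fun d v => d.insert v f) d).get? s = some f := by
  induction vs generalizing d with
  | nil => simp at hs
  | cons v t ih =>
      simp only [List.foldl_cons]
      by_cases ht : s ∈ t
      · exact ih _ ht
      · have hv : s = v := by simp at hs; tauto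
        subst hv
        rw [pvGet?_insertAll_not_mem s f t _ ht, PySem.Dict.get?_insert_self]

lemma pvGet?_build_not_mem (s : String) (fields : List (String × List String))
    (d : PySem.Dict String String) (hs : s ∉ fields.flatMap (fun fv => fv.2)) :
    (fields.foldl (fun d fv => fv.2.foldl (fun d v => d.insert v fv.1) d) d).get? s = d.get? s := by
  induction fields generalizing d with
  | nil => rfl
  | cons fv rest ih =>
      simp only [List.flatMap_cons, List.mem_append, not_or] at hs
      simp only [List.foldl_cons]
      rw [ih _ hs.2, pvGet?_insertAll_not_mem s fv.1 fv.2 d hs.1]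

lemma pvFold1_no_match (s : String) (idx : Int) (w : String)
    (fields : List (String × List String))
    (hs : s ∉ fields.flatMap (fun fv => fv.2))
    (st : PySem.Dict String (Int × String) × PySem.Set Int) :
    fields.foldl (fun st fv =>
      if st.1.contains fv.1 then st
      else if fv.2.any (fun v => s == v) then
        (st.1.insert fv.1 (idx, w), PySem.Set.add st.2 idx)
      else st) st = st := by
  apply pvFoldl_id
  intro b fv hfv
  have : ¬ (fv.2.any (fun v => s == v) = true) := by
    simp only [List.any_eq_true, beq_iff_eq]
    rintro ⟨v, hv, rfl⟩
    exact hs (List.mem_flatMap.mpr ⟨fv, hfv, hv⟩)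
  simp [this]

lemma pvFold1_eq (s : String) (idx : Int) (w : String) :
    ∀ (fields : List (String × List String)) (d : PySem.Dict String String),
      (fields.flatMap (fun fv => fv.2)).Nodup →
      d.get? s = none →
      ∀ (st : PySem.Dict String (Int × String) × PySem.Set Int),
      fields.foldl (fun st fv =>
        if st.1.contains fv.1 then st
        else if fv.2.any (fun v => s == v) then
          (st.1.insert fv.1 (idx, w), PySem.Set.add st.2 idx)
        else st) st
      = match (fields.foldl (fun d fv => fv.2.foldl (fun d v => d.insert v fv.1) d) d).get? s with
        | some f => if st.1.contains f then st else (st.1.insert f (idx, w), PySem.Set.add st.2 idx)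
        | none => st := by
  intro fields
  induction fields with
  | nil => intro d _ hd st; simp [hd]
  | cons fv rest ih =>
      intro d hnd hd st
      have hnd' : (rest.flatMap (fun fv => fv.2)).Nodup := by
        simp only [List.flatMap_cons] at hnd
        exact hnd.of_append_right
      have hdisj : ∀ x ∈ fv.2, x ∉ rest.flatMap (fun fv => fv.2) := by
        simp only [List.flatMap_cons] at hnd
        exact fun x hx => (List.disjoint_of_nodup_append hnd) hx
      by_cases hs : s ∈ fv.2
      · -- s exact-matches this field's variations; nothing later can match
        have hrest : s ∉ rest.flatMap (fun fv => fv.2) := hdisj s hs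
        have hany : (fv.2.any (fun v => s == v)) = true := by
          simp only [List.any_eq_true, beq_iff_eq]; exact ⟨s, hs, rfl⟩
        have hget : ((fv :: rest).foldl (fun d fv => fv.2.foldl (fun d v => d.insert v fv.1) d) d).get? s
            = some fv.1 := by
          simp only [List.foldl_cons]
          rw [pvGet?_build_not_mem s rest _ hrest, pvGet?_insertAll_mem s fv.1 fv.2 d hs]
        rw [hget]
        simp only [List.foldl_cons, hany]
        by_cases hc : st.1.contains fv.1
        · simp only [hc, if_true]
          exact pvFold1_no_match s idx w rest hrest st
        · simp only [hc, if_false, Bool.false_eq_true, if_true]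
          exact pvFold1_no_match s idx w rest hrest _
      · -- s does not match this field: the step is the identity on both sides
        have hany : (fv.2.any (fun v => s == v)) = false := by
          simp only [List.any_eq_false, beq_iff_eq]
          rintro v hv rfl; exact hs hv
        have hd' : (fv.2.foldl (fun d v => d.insert v fv.1) d).get? s = none := by
          rw [pvGet?_insertAll_not_mem s fv.1 fv.2 d hs]; exact hd
        simp only [List.foldl_cons, hany]
        have hstep : (if st.1.contains fv.1 then st
            else if false = true then (st.1.insert fv.1 (idx, w), PySem.Set.add st.2 idx) else st) = st := by
          by_cases hc : st.1.contains fv.1 <;> simp [hc]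
        rw [hstep]
        exact ih _ hnd' hd' st

set_option maxRecDepth 40000 in
lemma pvColA1_eq_colB1 : pvColA1 = pvColB1 := by
  funext st p
  unfold pvColA1 pvColB1
  by_cases hs : pvNormalizeHeader p.2 == ""
  · simp [hs]
  · simp only [hs, Bool.false_eq_true, if_false]
    have := pvFold1_eq (pvNormalizeHeader p.2) p.1 (PySem.Str.strip p.2) pvColumnMappings
      PySem.Dict.empty (by decide) (by rfl) st
    exact this

-- ---- pass 2: A's strict-improvement argmax equals first hit in the longest-first list ----
def pvKey (p : String × String) : Int := PySem.Str.len p.2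

def pvBestT (q : String × String → Bool) : Int → List (String × String) → Option (String × String)
  | _, [] => none
  | bl, x :: t =>
      if q x = true ∧ pvKey x > bl then
        match pvBestT q (pvKey x) t with
        | some z => some z
        | none => some x
      else pvBestT q bl t

lemma pvFoldBest_eq (q : String × String → Bool) :
    ∀ (L : List (String × String)) (b : Option String) (bl : Int),
    L.foldl (fun acc x => if q x = true ∧ pvKey x > acc.2 then (some x.1, pvKey x) else acc) (b, bl)
    = match pvBestT q bl L with
      | some z => (some z.1, pvKey z)
      | none => (b, bl) := by
  intro L
  induction L with
  | nil => intro b bl; rfl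
  | cons x t ih =>
      intro b bl
      simp only [List.foldl_cons, pvBestT]
      by_cases hc : q x = true ∧ pvKey x > bl
      · rw [if_pos hc, if_pos hc, ih (some x.1) (pvKey x)]
        cases pvBestT q (pvKey x) t <;> rfl
      · rw [if_neg hc, if_neg hc]
        exact ih b bl

lemma pvBestT_eq_none_iff (q : String × String → Bool) :
    ∀ (L : List (String × String)) (bl : Int),
    pvBestT q bl L = none ↔ ∀ y ∈ L, ¬(q y = true ∧ pvKey y > bl) := by
  intro L
  induction L with
  | nil => intro bl; simp [pvBestT]
  | cons x t ih =>
      intro bl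
      by_cases hc : q x = true ∧ pvKey x > bl
      · simp only [pvBestT, if_pos hc]
        constructor
        · intro h; cases hz : pvBestT q (pvKey x) t <;> simp [hz] at h
        · intro h; exact absurd hc (h x (by simp))
      · simp only [pvBestT, if_neg hc, ih bl]
        constructor
        · intro h y hy
          rcases List.mem_cons.mp hy with rfl | hy'
          · exact hc
          · exact h y hy'
        · intro h y hy; exact h y (by simp [hy])

lemma pvBestT_eq_some (q : String × String → Bool) :
    ∀ (L : List (String × String)) (bl : Int) (z : String × String),
    pvBestT q bl L = some z →
    ∃ L₁ L₂, L = L₁ ++ z :: L₂ ∧ q z = true ∧ pvKey z > bl ∧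
      (∀ y ∈ L₂, q y = true → pvKey y ≤ pvKey z) ∧
      (∀ y ∈ L₁, q y = true → pvKey y > bl → pvKey y < pvKey z) := by
  intro L
  induction L with
  | nil => intro bl z h; simp [pvBestT] at h
  | cons x t ih =>
      intro bl z h
      by_cases hc : q x = true ∧ pvKey x > bl
      · simp only [pvBestT, if_pos hc] at h
        cases ht : pvBestT q (pvKey x) t with
        | none =>
            rw [ht] at h
            have hz : x = z := by injection h
            subst hz
            refine ⟨[], t, by simp, hc.1, hc.2, ?_, by simp⟩
            intro y hy hqy
            have hn := (pvBestT_eq_none_iff q t (pvKey x)).mp ht y hy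
            by_contra hlt
            exact hn ⟨hqy, by omega⟩
        | some z' =>
            rw [ht] at h
            have hz : z' = z := by injection h
            subst hz
            obtain ⟨t₁, t₂, hteq, hqz, hkz, h₂, h₁⟩ := ih (pvKey x) z' ht
            refine ⟨x :: t₁, t₂, by simp [hteq], hqz, by omega, h₂, ?_⟩
            intro y hy hqy hby
            rcases List.mem_cons.mp hy with rfl | hy'
            · omega
            · by_cases hxk : pvKey y > pvKey x
              · exact h₁ y hy' hqy hxk
              · omega
      · simp only [pvBestT, if_neg hc] at h
        obtain ⟨t₁, t₂, hteq, hqz, hkz, h₂, h₁⟩ := ih bl z h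
        refine ⟨x :: t₁, t₂, by simp [hteq], hqz, hkz, h₂, ?_⟩
        intro y hy hqy hby
        rcases List.mem_cons.mp hy with rfl | hy'
        · exact absurd ⟨hqy, hby⟩ hc
        · exact h₁ y hy' hqy hby

lemma pvFind?_eq_some (q : String × String → Bool) :
    ∀ (L : List (String × String)) (x : String × String),
    L.find? q = some x →
    ∃ A B, L = A ++ x :: B ∧ q x = true ∧ ∀ a ∈ A, ¬ q a = true := by
  intro L
  induction L with
  | nil => intro x h; simp at h
  | cons y t ih =>
      intro x h
      by_cases hy : q y = true
      · rw [List.find?_cons_of_pos hy] at h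
        injection h with h; subst h
        exact ⟨[], t, by simp, hy, by simp⟩
      · rw [List.find?_cons_of_neg (by simpa using hy)] at h
        obtain ⟨A, B, heq, hqx, hA⟩ := ih x h
        refine ⟨y :: A, B, by simp [heq], hqx, ?_⟩
        intro a ha
        rcases List.mem_cons.mp ha with rfl | ha'
        · exact hy
        · exact hA a ha'

-- the central lemma: strict-improvement argmax over L = first hit in the stably
-- length-descending rearrangement L'
lemma pvBest_find (q : String × String → Bool) (L L' : List (String × String))
    (h1 : ∀ y ∈ L, y ∈ L') (h2 : ∀ y ∈ L', y ∈ L)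
    (hpw : L'.Pairwise (fun a b => pvKey b ≤ pvKey a))
    (hstab : ∀ x ∈ L', L'.filter (fun y => pvKey y == pvKey x) = L.filter (fun y => pvKey y == pvKey x))
    (hpos : ∀ y ∈ L, 0 < pvKey y) :
    pvBestT q 0 L = L'.find? q := by
  cases hA : pvBestT q 0 L with
  | none =>
      cases hB : L'.find? q with
      | none => rfl
      | some x =>
          exfalso
          have hx := List.find?_some hB
          have hxL : x ∈ L := h2 x (List.mem_of_find?_eq_some hB)
          exact (pvBestT_eq_none_iff q L 0).mp hA x hxL ⟨hx, hpos x hxL⟩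
  | some z =>
      obtain ⟨L₁, L₂, hLeq, hqz, hkz, h₂, h₁⟩ := pvBestT_eq_some q L 0 z hA
      cases hB : L'.find? q with
      | none =>
          exfalso
          have hzL' : z ∈ L' := h1 z (by simp [hLeq])
          have := List.find?_eq_none.mp hB z hzL'
          exact this hqz
      | some x =>
          obtain ⟨A, B, hL'eq, hqx, hAfail⟩ := pvFind?_eq_some q L' x hB
          by_cases hzx : z = x
          · rw [hzx]
          · -- step 1: pvKey z = pvKey x
            have hxL : x ∈ L := h2 x (by simp [hL'eq])
            have hxle : pvKey x ≤ pvKey z := by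
              have hxL2 : x ∈ L₁ ++ z :: L₂ := hLeq ▸ hxL
              rcases List.mem_append.mp hxL2 with hx1 | hx2
              · exact le_of_lt (h₁ x hx1 hqx (hpos x hxL))
              · rcases List.mem_cons.mp hx2 with rfl | hx2'
                · exact le_refl _
                · exact h₂ x hx2' hqx
            have hzle : pvKey z ≤ pvKey x := by
              have hzL' : z ∈ L' := h1 z (by simp [hLeq])
              rw [hL'eq] at hzL'
              rcases List.mem_append.mp hzL' with hz1 | hz2
              · exact absurd hqz (hAfail z hz1)
              · rcases List.mem_cons.mp hz2 with rfl | hz2'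
                · exact le_refl _
                · have hp := (List.pairwise_append.mp (hL'eq ▸ hpw)).2.1
                  exact (List.pairwise_cons.mp hp).1 z hz2'
            have hk : pvKey z = pvKey x := le_antisymm hzle hxle
            -- step 2: heads of the equal filtered lists
            have hxL' : x ∈ L' := by simp [hL'eq]
            have hfilters := hstab x hxL'
            have hL'f : (L'.filter (fun y => q y && (pvKey y == pvKey x))).head? = some x := by
              rw [hL'eq, List.filter_append, List.filter_cons]
              have : (q x && (pvKey x == pvKey x)) = true := by simp [hqx]
              rw [if_pos this]
              have hAnil : A.filter (fun y => q y && (pvKey y == pvKey x)) = [] := by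
                apply List.filter_eq_nil_iff.mpr
                intro a ha
                simp only [Bool.and_eq_true, not_and]
                intro hqa; exact absurd hqa (hAfail a ha)
              rw [hAnil]; rfl
            have hLf : (L.filter (fun y => q y && (pvKey y == pvKey x))).head? = some z := by
              rw [hLeq, List.filter_append, List.filter_cons]
              have : (q z && (pvKey z == pvKey x)) = true := by simp [hqz, hk]
              rw [if_pos this]
              have hL1nil : L₁.filter (fun y => q y && (pvKey y == pvKey x)) = [] := by
                apply List.filter_eq_nil_iff.mpr
                intro a ha
                simp only [Bool.and_eq_true, not_and, beq_iff_eq]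
                intro hqa hka
                have haL : a ∈ L := by simp [hLeq, ha]
                have := h₁ a ha hqa (hpos a haL)
                omega
              rw [hL1nil]; rfl
            have hff : L'.filter (fun y => q y && (pvKey y == pvKey x))
                = L.filter (fun y => q y && (pvKey y == pvKey x)) := by
              have e1 : L'.filter (fun y => q y && (pvKey y == pvKey x))
                  = (L'.filter (fun y => pvKey y == pvKey x)).filter q := by
                rw [List.filter_filter]
              have e2 : L.filter (fun y => q y && (pvKey y == pvKey x))
                  = (L.filter (fun y => pvKey y == pvKey x)).filter q := by
                rw [List.filter_filter]
              rw [e1, e2, hfilters]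
            rw [hff, hLf] at hL'f
            injection hL'f with h
            rw [h]

-- flattening A's nested argmax scan
lemma pvBestA_flat_aux (s : String) (d : PySem.Dict String (Int × String)) :
    ∀ (fields : List (String × List String)) (acc : Option String × Int),
    fields.foldl (fun acc fv =>
      if d.contains fv.1 then acc
      else fv.2.foldl (fun acc v =>
        if PySem.Str.isIn v s = true ∧ PySem.Str.len v > acc.2 then (some fv.1, PySem.Str.len v)
        else acc) acc) acc
    = (fields.flatMap (fun fv => fv.2.map (fun v => (fv.1, v)))).foldl
        (fun acc x => if (!d.contains x.1 && PySem.Str.isIn x.2 s) = true ∧ pvKey x > acc.2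
          then (some x.1, pvKey x) else acc) acc := by
  intro fields
  induction fields with
  | nil => intro acc; rfl
  | cons fv rest ih =>
      intro acc
      simp only [List.foldl_cons, List.flatMap_cons, List.foldl_append, List.foldl_map]
      rw [← ih]
      congr 1
      by_cases hc : d.contains fv.1
      · rw [if_pos hc]
        apply Eq.symm
        apply pvFoldl_id
        intro b v _
        simp [hc, pvKey]
      · rw [if_neg hc]
        apply pvFoldl_ext
        intro b v _
        have hcf : d.contains fv.1 = false := by simpa using hc
        simp [hcf, pvKey]

set_option maxRecDepth 100000 in
set_option maxHeartbeats 1000000 in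
lemma pvColA2_eq_colB2 : pvColA2 = pvColB2 := by
  funext st p
  unfold pvColA2 pvColB2
  by_cases hu : st.2.contains p.1 = true
  · rw [if_pos hu, if_pos hu]
  · rw [if_neg hu, if_neg hu]
    by_cases hs : (pvNormalizeHeader p.2 == "") = true
    · rw [if_pos hs, if_pos hs]
    · rw [if_neg hs, if_neg hs]
      have hbest : (pvBestA (pvNormalizeHeader p.2) st.1).1
          = (pvPartialIndex.find? (fun q => !st.1.contains q.1 && PySem.Str.isIn q.2 (pvNormalizeHeader p.2))).map (fun q => q.1) := by
        unfold pvBestA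
        rw [pvBestA_flat_aux (pvNormalizeHeader p.2) st.1 pvColumnMappings (none, 0)]
        rw [pvFoldBest_eq (fun x => !st.1.contains x.1 && PySem.Str.isIn x.2 (pvNormalizeHeader p.2))
          (pvColumnMappings.flatMap (fun fv => fv.2.map (fun v => (fv.1, v)))) none 0]
        rw [pvBest_find (fun x => !st.1.contains x.1 && PySem.Str.isIn x.2 (pvNormalizeHeader p.2))
          (pvColumnMappings.flatMap (fun fv => fv.2.map (fun v => (fv.1, v)))) pvPartialIndex
          (by decide) (by decide) (by decide) (by decide) (by decide)]
        cases pvPartialIndex.find? (fun q => !st.1.contains q.1 && PySem.Str.isIn q.2 (pvNormalizeHeader p.2)) <;> rfl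
      rw [hbest]
      cases pvPartialIndex.find? (fun q => !st.1.contains q.1 && PySem.Str.isIn q.2 (pvNormalizeHeader p.2)) <;> rfl

-- ===== VERDICT (by name: the statement is the Claim_ definition above) =====
theorem detect_column_mappings_py_spec : Claim_equal_detect_column_mappings_py := by
  intro header_row _
  unfold Spec_detect_column_mappings_py detect_column_mappings_py detect_column_mappings_py_alt
  rw [pvColA1_eq_colB1, pvColA2_eq_colB2]
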